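-- pv_equiv track=rewrite | github.com/PanayotisManganaris/spyglass | spyglass/_utils.py | match_labels
-- ===== SOURCE A (Python) =====
-- def match_labels(p_cols, e_cols):
--     matched = []
--     for e_col in e_cols:
--         for p_col in p_cols:
--             if p_col[2::] == e_col:
--                 matched.append(e_col)
--                 matched.append(p_col)
--     return matched
-- ===== SOURCE B (Python) =====
-- def match_labels(p_cols, e_cols):
--     by_suffix = {}
--     for p_col in p_cols:
--         by_suffix.setdefault(p_col[2:], []).append(p_col)
--     matched = []
--     for e_col in e_cols:
--         for p_col in by_suffix.get(e_col, []):
--             matched.append(e_col)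
--             matched.append(p_col)
--     return matched
-- ===== Notes on version B (the rewrite author's own statement) =====
-- stated objective: faster
-- what changed: Replaced the nested scan of p_cols per e_col by a dict indexing p_cols once by their suffix p_col[2:], then a single pass over e_cols with O(1) lookups.
import Mathlib
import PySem

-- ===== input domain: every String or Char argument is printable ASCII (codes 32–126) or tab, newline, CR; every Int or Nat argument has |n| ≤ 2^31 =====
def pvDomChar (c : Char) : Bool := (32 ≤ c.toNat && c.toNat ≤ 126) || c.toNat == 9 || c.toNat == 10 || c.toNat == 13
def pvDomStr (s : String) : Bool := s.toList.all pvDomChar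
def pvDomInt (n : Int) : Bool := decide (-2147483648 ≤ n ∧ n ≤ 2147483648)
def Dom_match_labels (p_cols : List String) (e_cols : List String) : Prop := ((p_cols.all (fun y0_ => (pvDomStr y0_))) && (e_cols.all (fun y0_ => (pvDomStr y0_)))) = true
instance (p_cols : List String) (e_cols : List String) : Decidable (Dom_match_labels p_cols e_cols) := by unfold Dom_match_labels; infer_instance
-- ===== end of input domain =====

-- B replaces A's nested scan by a one-pass dict index of p_cols keyed on the suffix p_col[2:] (asymptotically faster; return value proved identical).

-- ===== PORT A =====
def match_labels (p_cols : List String) (e_cols : List String) : List String :=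
  e_cols.foldl (fun matched e_col =>
    p_cols.foldl (fun matched p_col =>
      if PySem.Str.slice p_col (some 2) none = e_col then matched ++ [e_col, p_col] else matched)
      matched) []

-- ===== PORT B =====
-- by_suffix.setdefault(p[2:], []).append(p), as insert of the extended list
def pvBySuffix (p_cols : List String) : PySem.Dict String (List String) :=
  p_cols.foldl (fun d p_col =>
    d.insert (PySem.Str.slice p_col (some 2) none)
             (d.getD (PySem.Str.slice p_col (some 2) none) [] ++ [p_col]))
    PySem.Dict.empty

def match_labels_alt (p_cols : List String) (e_cols : List String) : List String :=
  let by_suffix := pvBySuffix p_cols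
  e_cols.foldl (fun matched e_col =>
    (by_suffix.getD e_col []).foldl (fun matched p_col => matched ++ [e_col, p_col]) matched) []

-- ===== PRECONDITION & SPEC =====
def Spec_match_labels (p_cols : List String) (e_cols : List String) (out : List String) : Prop := out = match_labels_alt p_cols e_cols
instance (p_cols : List String) (e_cols : List String) (out : List String) : Decidable (Spec_match_labels p_cols e_cols out) := by unfold Spec_match_labels; infer_instance

-- ===== CLAIM (what is proved, stated in full; the proofs are below) =====
def Claim_equal_match_labels : Prop := ∀ (p_cols : List String) (e_cols : List String), Dom_match_labels p_cols e_cols → Spec_match_labels p_cols e_cols (match_labels p_cols e_cols)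

-- ===== LEMMAS AND PROOFS =====

-- A's inner loop over p_cols collects, in order, the matching pairs after the accumulator
theorem pv_inner_a (e : String) :
    ∀ (ps : List String) (acc : List String),
      ps.foldl (fun matched p_col =>
        if PySem.Str.slice p_col (some 2) none = e then matched ++ [e, p_col] else matched) acc
      = acc ++ (ps.filter (fun p => PySem.Str.slice p (some 2) none == e)).flatMap (fun p => [e, p]) := by
  intro ps
  induction ps with
  | nil => simp
  | cons p rest ih =>
    intro acc
    simp only [List.foldl_cons, List.filter_cons]
    by_cases h : PySem.Str.slice p (some 2) none = e
    · simp [h, ih]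
    · simp [h, ih]

-- the dict built by pvBySuffix holds, under key e, exactly the matching p_cols in order
theorem pv_bySuffix_getD (e : String) :
    ∀ (ps : List String) (d : PySem.Dict String (List String)),
      (ps.foldl (fun d p_col =>
        d.insert (PySem.Str.slice p_col (some 2) none)
                 (d.getD (PySem.Str.slice p_col (some 2) none) [] ++ [p_col])) d).getD e []
      = d.getD e [] ++ (ps.filter (fun p => PySem.Str.slice p (some 2) none == e)) := by
  intro ps
  induction ps with
  | nil => simp
  | cons p rest ih =>
    intro d
    simp only [List.foldl_cons, List.filter_cons]
    rw [ih]
    rw [PySem.Dict.getD_insert]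
    by_cases h : PySem.Str.slice p (some 2) none = e
    · simp [h]
    · simp [h, Ne.symm h]

-- B's inner loop appends e interleaved with the stored list
theorem pv_inner_b (e : String) :
    ∀ (l acc : List String),
      l.foldl (fun matched p_col => matched ++ [e, p_col]) acc
      = acc ++ l.flatMap (fun p => [e, p]) := by
  intro l
  induction l with
  | nil => simp
  | cons p rest ih => intro acc; simp [ih]

theorem pv_outer (p_cols : List String) :
    ∀ (es acc : List String),
      es.foldl (fun matched e_col =>
        p_cols.foldl (fun matched p_col =>
          if PySem.Str.slice p_col (some 2) none = e_col then matched ++ [e_col, p_col] else matched)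
          matched) acc
      = es.foldl (fun matched e_col =>
          ((pvBySuffix p_cols).getD e_col []).foldl (fun matched p_col => matched ++ [e_col, p_col]) matched) acc := by
  intro es
  induction es with
  | nil => intro acc; rfl
  | cons e rest ih =>
    intro acc
    simp only [List.foldl_cons]
    rw [pv_inner_a, pv_inner_b]
    rw [show (pvBySuffix p_cols).getD e [] = p_cols.filter (fun p => PySem.Str.slice p (some 2) none == e) from by
      simpa [pvBySuffix] using pv_bySuffix_getD e p_cols PySem.Dict.empty]
    exact ih _

-- ===== VERDICT (by name: the statement is the Claim_ definition above) =====
theorem match_labels_spec : Claim_equal_match_labels := by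
  intro p_cols e_cols _
  unfold Spec_match_labels match_labels match_labels_alt
  exact pv_outer p_cols e_cols []
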